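-- pv_equiv track=rewrite | github.com/vaibhav-jain-dev/learning-algo | problems/200-must-solve/arrays/10-monotonic-array/similar/03-can-become-monotonic/python_code.py | can_become_monotonic_compact
-- ===== SOURCE A (Python) =====
-- from typing import List
--
-- def can_become_monotonic_compact(array: List[int]) -> bool:
--     """
--     Compact version checking both directions in one function.
--     """
--     def check_direction(arr: List[int], compare) -> bool:
--         """Check if can become monotonic in given direction."""
--         if len(arr) <= 2:
--             return True
--
--         violation_idx = -1
--         for i in range(len(arr) - 1):
--             if not compare(arr[i], arr[i + 1]):
--                 if violation_idx != -1:
--                     return False  # Second violation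
--                 violation_idx = i
--
--         if violation_idx == -1:
--             return True
--
--         i = violation_idx
--         # Option A: fix arr[i]
--         if i == 0 or compare(arr[i - 1], arr[i + 1]):
--             return True
--         # Option B: fix arr[i+1]
--         if i + 1 == len(arr) - 1 or compare(arr[i], arr[i + 2]):
--             return True
--
--         return False
--
--     return (check_direction(array, lambda a, b: a <= b) or
--             check_direction(array, lambda a, b: a >= b))
-- ===== SOURCE B (Python) =====
-- from typing import List
--
-- def can_become_monotonic_compact(array: List[int]) -> bool:
--     """
--     Greedy single pass per direction: allow one repair, tracking only the
--     previous two effective values instead of indexing/rescanning.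
--     """
--     def check_direction(arr: List[int], compare) -> bool:
--         changed = False
--         prevprev = None
--         prev = None
--         for x in arr:
--             if prev is not None and not compare(prev, x):
--                 if changed:
--                     return False
--                 changed = True
--                 if prevprev is None or compare(prevprev, x):
--                     prevprev, prev = prev, x   # lower prev to x
--                 else:
--                     prevprev = prev            # raise x to prev (keep prev)
--             else:
--                 prevprev, prev = prev, x
--         return True
--
--     return (check_direction(array, lambda a, b: a <= b) or
--             check_direction(array, lambda a, b: a >= b))
-- ===== Notes on version B (the rewrite author's own statement) =====
-- stated objective: alternative
-- what changed: Replaces the index-based scan that records a violation index and then re-inspects the array at i-1/i+1/i+2 with a greedy single pass over the elements that keeps only the previous two effective values and repairs the first violation on the spot (no indexing, no sentinel, no post-scan fix-up check).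
import Mathlib
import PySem

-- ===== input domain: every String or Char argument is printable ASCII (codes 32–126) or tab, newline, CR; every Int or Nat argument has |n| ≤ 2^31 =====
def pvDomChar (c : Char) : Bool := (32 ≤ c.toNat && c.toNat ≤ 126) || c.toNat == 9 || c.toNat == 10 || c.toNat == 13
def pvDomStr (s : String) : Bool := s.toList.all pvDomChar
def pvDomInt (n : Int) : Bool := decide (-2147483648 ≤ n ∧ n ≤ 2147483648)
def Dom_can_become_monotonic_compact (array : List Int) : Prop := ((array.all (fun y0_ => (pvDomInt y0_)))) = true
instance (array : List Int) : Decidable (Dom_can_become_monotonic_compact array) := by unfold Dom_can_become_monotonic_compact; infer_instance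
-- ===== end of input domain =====

-- B replaces A's record-the-violation-index-then-re-inspect scan by a greedy
-- single pass tracking only the previous two effective values (objective: alternative).

-- ===== PORT A =====
-- one step of A's 'for i in range(len(arr)-1)' loop; state none = early 'return False',
-- some v = current violation_idx (Python's -1 sentinel kept as Int).
-- indices produced by the loop are always in range, so pyGetD's default 0 is never used.
def pvStepA (cmp : Int → Int → Bool) (arr : List Int) (st : Option Int) (i : Int) : Option Int :=
  match st with
  | none => none
  | some v =>
    if cmp (PySem.List.pyGetD arr i 0) (PySem.List.pyGetD arr (i + 1) 0) then some v
    else if v ≠ -1 then none else some i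

-- A's inner check_direction
def pvCheckDirA (arr : List Int) (cmp : Int → Int → Bool) : Bool :=
  if arr.length ≤ 2 then true
  else
    match (PySem.List.pyRange 0 ((arr.length : Int) - 1) 1).foldl (pvStepA cmp arr) (some (-1)) with
    | none => false
    | some v =>
      if v = -1 then true
      else if v = 0 ∨ cmp (PySem.List.pyGetD arr (v - 1) 0) (PySem.List.pyGetD arr (v + 1) 0) then true
      else if v + 1 = (arr.length : Int) - 1 ∨ cmp (PySem.List.pyGetD arr v 0) (PySem.List.pyGetD arr (v + 2) 0) then true
      else false

def can_become_monotonic_compact (array : List Int) : Bool :=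
  pvCheckDirA array (fun a b => decide (a ≤ b)) || pvCheckDirA array (fun a b => decide (a ≥ b))

-- ===== PORT B =====
-- B's loop: state = (changed, prevprev, prev), one element consumed per step.
def pvGoB (cmp : Int → Int → Bool) (changed : Bool) (pp p : Option Int) : List Int → Bool
  | [] => true
  | x :: rest =>
    match p with
    | some pv =>
      if !(cmp pv x) then
        if changed then false
        else
          match pp with
          | none => pvGoB cmp true (some pv) (some x) rest
          | some ppv =>
            if cmp ppv x then pvGoB cmp true (some pv) (some x) rest
            else pvGoB cmp true (some pv) (some pv) rest
      else pvGoB cmp changed p (some x) rest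
    | none => pvGoB cmp changed p (some x) rest

-- B's inner check_direction
def pvCheckDirB (arr : List Int) (cmp : Int → Int → Bool) : Bool :=
  pvGoB cmp false none none arr

def can_become_monotonic_compact_alt (array : List Int) : Bool :=
  pvCheckDirB array (fun a b => decide (a ≤ b)) || pvCheckDirB array (fun a b => decide (a ≥ b))

-- ===== PRECONDITION & SPEC =====
def Spec_can_become_monotonic_compact (array : List Int) (out : Bool) : Prop := out = can_become_monotonic_compact_alt array
instance (array : List Int) (out : Bool) : Decidable (Spec_can_become_monotonic_compact array out) := by unfold Spec_can_become_monotonic_compact; infer_instance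

-- ===== CLAIM (what is proved, stated in full; the proofs are below) =====
def Claim_equal_can_become_monotonic_compact : Prop := ∀ (array : List Int), Dom_can_become_monotonic_compact array → Spec_can_become_monotonic_compact array (can_become_monotonic_compact array)

-- ===== LEMMAS AND PROOFS =====

-- proof-only helpers: a structural reformulation of A's scan
def pvChain (cmp : Int → Int → Bool) (p : Int) : List Int → Bool
  | [] => true
  | x :: r => cmp p x && pvChain cmp x r

def pvGoA (cmp : Int → Int → Bool) (pp : Option Int) (p : Int) : List Int → Bool
  | [] => true
  | x :: rest =>
    if cmp p x then pvGoA cmp (some p) x rest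
    else pvChain cmp x rest &&
      ((match pp with | none => true | some q => cmp q x) ||
       (match rest with | [] => true | y :: _ => cmp p y))

-- A's post-loop code, as a function of the loop's final state
def pvFinalize (cmp : Int → Int → Bool) (arr : List Int) (st : Option Int) : Bool :=
  match st with
  | none => false
  | some v =>
    if v = -1 then true
    else if v = 0 ∨ cmp (PySem.List.pyGetD arr (v - 1) 0) (PySem.List.pyGetD arr (v + 1) 0) then true
    else if v + 1 = (arr.length : Int) - 1 ∨ cmp (PySem.List.pyGetD arr v 0) (PySem.List.pyGetD arr (v + 2) 0) then true
    else false

lemma pvDropGetD (l : List Int) (k : Nat) (h : k < l.length) :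
    l.drop k = (l[k]?).getD 0 :: l.drop (k + 1) := by
  rw [List.getElem?_eq_getElem h, Option.getD_some, List.drop_eq_getElem_cons h]

lemma pvFoldNone (cmp : Int → Int → Bool) (arr : List Int) (ls : List Int) :
    ls.foldl (pvStepA cmp arr) none = none := by
  induction ls with
  | nil => rfl
  | cons x r ih => simpa [pvStepA] using ih

-- after the first repair, B just checks that the rest is a chain
lemma pvGoB_changed (cmp : Int → Int → Bool) :
    ∀ (l : List Int) (pp : Option Int) (p : Int),
      pvGoB cmp true pp (some p) l = pvChain cmp p l := by
  intro l
  induction l with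
  | nil => intro pp p; rfl
  | cons x r ih =>
    intro pp p
    by_cases h : cmp p x = true
    · simp [pvGoB, pvChain, h, ih]
    · simp [pvGoB, pvChain, h]

-- B = the structural reformulation of A, given the order fact H2
lemma pvGoB_eq_goA (cmp : Int → Int → Bool)
    (H2 : ∀ a b c : Int, cmp a c = true → cmp a b = false → cmp b c = true) :
    ∀ (l : List Int) (pp : Option Int) (p : Int),
      pvGoB cmp false pp (some p) l = pvGoA cmp pp p l := by
  intro l
  induction l with
  | nil => intro pp p; rfl
  | cons x r ih =>
    intro pp p
    by_cases h : cmp p x = true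
    · simp [pvGoB, pvGoA, h, ih]
    · cases pp with
      | none => simp [pvGoB, pvGoA, h, pvGoB_changed]
      | some q =>
        by_cases hq : cmp q x = true
        · simp [pvGoB, pvGoA, h, hq, pvGoB_changed]
        · cases r with
          | nil => simp [pvGoB, pvGoA, h, hq, pvChain]
          | cons y r2 =>
            by_cases hpy : cmp p y = true
            · have hxy : cmp x y = true := H2 p x y hpy (by simpa using h)
              simp [pvGoB, pvGoA, h, hq, pvGoB_changed, pvChain, hpy, hxy]
            · simp [pvGoB, pvGoA, h, hq, pvChain, hpy]

-- A's loop after a violation was recorded: it finishes with the recorded index iff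
-- the rest of the array is a chain, otherwise it returns early
lemma pvScanAfter (cmp : Int → Int → Bool) (arr : List Int) (m : Nat) :
    ∀ (k : Nat) (v : Int), k + m + 1 = arr.length → 0 ≤ v →
      (PySem.List.pyRange (k : Int) ((arr.length : Int) - 1) 1).foldl (pvStepA cmp arr) (some v)
        = (if pvChain cmp ((arr[k]?).getD 0) (arr.drop (k + 1)) then some v else none) := by
  induction m with
  | zero =>
    intro k v hk _
    have h1 : ((arr.length : Int) - 1) ≤ (k : Int) := by omega
    rw [PySem.List.pyRange_one_eq_nil h1]
    have h2 : arr.drop (k + 1) = [] := by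
      apply List.drop_eq_nil_of_le; omega
    simp [h2, pvChain]
  | succ m ih =>
    intro k v hk hv
    have hlt : (k : Int) < (arr.length : Int) - 1 := by omega
    rw [PySem.List.pyRange_one_cons hlt, List.foldl_cons]
    have hc1 : ((k : Int) + 1) = ((k + 1 : Nat) : Int) := by push_cast; ring
    have hg1 : PySem.List.pyGetD arr (k : Int) 0 = (arr[k]?).getD 0 := by
      rw [PySem.List.pyGetD_natCast]; rfl
    have hg2 : PySem.List.pyGetD arr ((k : Int) + 1) 0 = (arr[k + 1]?).getD 0 := by
      rw [hc1, PySem.List.pyGetD_natCast]; rfl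
    have hdrop : arr.drop (k + 1) = (arr[k + 1]?).getD 0 :: arr.drop (k + 2) :=
      pvDropGetD arr (k + 1) (by omega)
    by_cases hcmp : cmp ((arr[k]?).getD 0) ((arr[k + 1]?).getD 0) = true
    · have hstep : pvStepA cmp arr (some v) (k : Int) = some v := by
        simp only [pvStepA, hg1, hg2, hcmp, if_true]
      rw [hstep, hc1, ih (k + 1) v (by omega) hv]
      rw [hdrop]
      simp only [pvChain, hcmp, Bool.true_and]
    · have hcmp' : cmp ((arr[k]?).getD 0) ((arr[k + 1]?).getD 0) = false := by simpa using hcmp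
      have hstep : pvStepA cmp arr (some v) (k : Int) = none := by
        have hv' : v ≠ -1 := by omega
        simp only [pvStepA, hg1, hg2, hcmp', Bool.false_eq_true, if_false, hv', ne_eq,
          not_false_eq_true, if_true]
      rw [hstep, pvFoldNone, hdrop]
      simp only [pvChain, hcmp', Bool.false_and, Bool.false_eq_true, if_false]

-- the main bridge: A's indexed loop + post-loop check = the structural pvGoA
lemma pvMainBridge (cmp : Int → Int → Bool) (arr : List Int) (m : Nat) :
    ∀ (k : Nat), k + m + 1 = arr.length →
      pvFinalize cmp arr
        ((PySem.List.pyRange (k : Int) ((arr.length : Int) - 1) 1).foldl (pvStepA cmp arr) (some (-1)))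
        = pvGoA cmp (if k = 0 then none else some ((arr[k - 1]?).getD 0)) ((arr[k]?).getD 0) (arr.drop (k + 1)) := by
  induction m with
  | zero =>
    intro k hk
    have h1 : ((arr.length : Int) - 1) ≤ (k : Int) := by omega
    rw [PySem.List.pyRange_one_eq_nil h1]
    have h2 : arr.drop (k + 1) = [] := by apply List.drop_eq_nil_of_le; omega
    simp [h2, pvGoA, pvFinalize]
  | succ m ih =>
    intro k hk
    have hlt : (k : Int) < (arr.length : Int) - 1 := by omega
    rw [PySem.List.pyRange_one_cons hlt, List.foldl_cons]
    have hc1 : ((k : Int) + 1) = ((k + 1 : Nat) : Int) := by push_cast; ring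
    have hg1 : PySem.List.pyGetD arr (k : Int) 0 = (arr[k]?).getD 0 := by
      rw [PySem.List.pyGetD_natCast]; rfl
    have hg2 : PySem.List.pyGetD arr ((k : Int) + 1) 0 = (arr[k + 1]?).getD 0 := by
      rw [hc1, PySem.List.pyGetD_natCast]; rfl
    have hdrop : arr.drop (k + 1) = (arr[k + 1]?).getD 0 :: arr.drop (k + 2) :=
      pvDropGetD arr (k + 1) (by omega)
    by_cases hcmp : cmp ((arr[k]?).getD 0) ((arr[k + 1]?).getD 0) = true
    · have hstep : pvStepA cmp arr (some (-1)) (k : Int) = some (-1) := by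
        simp [pvStepA, hg1, hg2, hcmp]
      rw [hstep, hc1, ih (k + 1) (by omega)]
      simp [hdrop, pvGoA, hcmp]
    · have hstep : pvStepA cmp arr (some (-1)) (k : Int) = some (k : Int) := by
        simp [pvStepA, hg1, hg2, hcmp]
      rw [hstep, hc1, pvScanAfter cmp arr m (k + 1) (k : Int) (by omega) (by omega)]
      by_cases hch : pvChain cmp ((arr[k + 1]?).getD 0) (arr.drop (k + 2)) = true
      · -- exactly one violation: compare A's two fix conditions with pvGoA's
        rw [if_pos hch]
        have hkne : (k : Int) ≠ -1 := by omega
        have hcondA : ((k : Int) = 0 ∨ cmp (PySem.List.pyGetD arr ((k : Int) - 1) 0) (PySem.List.pyGetD arr ((k : Int) + 1) 0) = true)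
            ↔ ((match (if k = 0 then none else some ((arr[k - 1]?).getD 0)) with
                | none => true | some q => cmp q ((arr[k + 1]?).getD 0)) = true) := by
          by_cases hk0 : k = 0
          · subst hk0; simp
          · have hge : 1 ≤ k := by omega
            have hcast : ((k : Int) - 1) = ((k - 1 : Nat) : Int) := by omega
            have hgm : PySem.List.pyGetD arr ((k : Int) - 1) 0 = (arr[k - 1]?).getD 0 := by
              rw [hcast, PySem.List.pyGetD_natCast]; rfl
            have hkz : ¬ ((k : Int) = 0) := by omega
            simp [hk0, hgm, hg2]
        have hcondB : ((k : Int) + 1 = (arr.length : Int) - 1 ∨ cmp (PySem.List.pyGetD arr (k : Int) 0) (PySem.List.pyGetD arr ((k : Int) + 2) 0) = true)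
            ↔ ((match arr.drop (k + 2) with
                | [] => true | y :: _ => cmp ((arr[k]?).getD 0) y) = true) := by
          by_cases hend : k + 2 = arr.length
          · have hd : arr.drop (k + 2) = [] := by apply List.drop_eq_nil_of_le; omega
            simp only [hd]
            constructor
            · intro _; trivial
            · intro _; exact Or.inl (by omega)
          · have hlt2 : k + 2 < arr.length := by omega
            have hdrop2 : arr.drop (k + 2) = (arr[k + 2]?).getD 0 :: arr.drop (k + 3) :=
              pvDropGetD arr (k + 2) hlt2
            have hcast : ((k : Int) + 2) = ((k + 2 : Nat) : Int) := by omega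
            have hgp : PySem.List.pyGetD arr ((k : Int) + 2) 0 = (arr[k + 2]?).getD 0 := by
              rw [hcast, PySem.List.pyGetD_natCast]; rfl
            have hne : ¬ ((k : Int) + 1 = (arr.length : Int) - 1) := by omega
            simp [hdrop2, hgp, hg1, hne]
        have hcmp' : cmp ((arr[k]?).getD 0) ((arr[k + 1]?).getD 0) = false := by
          simpa using hcmp
        simp only [pvFinalize]
        rw [if_neg hkne, hdrop]
        simp only [pvGoA, hcmp', Bool.false_eq_true, if_false]
        rw [hch, Bool.true_and]
        by_cases hA : ((k : Int) = 0 ∨ cmp (PySem.List.pyGetD arr ((k : Int) - 1) 0) (PySem.List.pyGetD arr ((k : Int) + 1) 0) = true)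
        · rw [if_pos hA, hcondA.mp hA, Bool.true_or]
        · rw [if_neg hA]
          have h1 : (match (if k = 0 then none else some ((arr[k - 1]?).getD 0)) with
              | none => true | some q => cmp q ((arr[k + 1]?).getD 0)) = false := by
            rw [← Bool.not_eq_true]; exact fun hh => hA (hcondA.mpr hh)
          rw [h1, Bool.false_or]
          by_cases hB : ((k : Int) + 1 = (arr.length : Int) - 1 ∨ cmp (PySem.List.pyGetD arr (k : Int) 0) (PySem.List.pyGetD arr ((k : Int) + 2) 0) = true)
          · rw [if_pos hB, hcondB.mp hB]
          · rw [if_neg hB]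
            have h2 : (match arr.drop (k + 2) with
                | [] => true | y :: _ => cmp ((arr[k]?).getD 0) y) = false := by
              rw [← Bool.not_eq_true]; exact fun hh => hB (hcondB.mpr hh)
            rw [h2]
      · rw [if_neg hch]
        simp [pvFinalize, hdrop, pvGoA, hcmp, hch]

-- per-direction equality
lemma pvDir_eq (cmp : Int → Int → Bool)
    (H2 : ∀ a b c : Int, cmp a c = true → cmp a b = false → cmp b c = true)
    (arr : List Int) : pvCheckDirA arr cmp = pvCheckDirB arr cmp := by
  by_cases hsmall : arr.length ≤ 2
  · -- both sides are true on lists of length ≤ 2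
    have hA : pvCheckDirA arr cmp = true := by simp [pvCheckDirA, hsmall]
    rw [hA]
    match arr, hsmall with
    | [], _ => rfl
    | [a], _ => rfl
    | [a, b], _ =>
      by_cases h : cmp a b = true <;> simp [pvCheckDirB, pvGoB, h]
  · match arr, hsmall with
    | a :: r, hsmall =>
      have hlen : 0 + (r.length) + 1 = (a :: r).length := by simp
      have hb := pvMainBridge cmp (a :: r) r.length 0 hlen
      have hA : pvCheckDirA (a :: r) cmp
          = pvFinalize cmp (a :: r)
              ((PySem.List.pyRange 0 (((a :: r).length : Int) - 1) 1).foldl (pvStepA cmp (a :: r)) (some (-1))) := by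
        simp only [pvCheckDirA, if_neg hsmall, pvFinalize]
      rw [hA]
      have h0 : ((0 : Nat) : Int) = 0 := rfl
      rw [← h0, hb]
      simp only [pvCheckDirB]
      have : pvGoB cmp false none none (a :: r) = pvGoB cmp false none (some a) r := by
        simp [pvGoB]
      rw [this, pvGoB_eq_goA cmp H2 r none a]
      simp

lemma pvH2_le : ∀ a b c : Int, (decide (a ≤ c)) = true → (decide (a ≤ b)) = false → (decide (b ≤ c)) = true := by
  intro a b c h1 h2; simp at *; omega

lemma pvH2_ge : ∀ a b c : Int, (decide (a ≥ c)) = true → (decide (a ≥ b)) = false → (decide (b ≥ c)) = true := by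
  intro a b c h1 h2; simp at *; omega

-- ===== VERDICT (by name: the statement is the Claim_ definition above) =====
theorem can_become_monotonic_compact_spec : Claim_equal_can_become_monotonic_compact := by
  intro array _
  unfold Spec_can_become_monotonic_compact can_become_monotonic_compact can_become_monotonic_compact_alt
  rw [pvDir_eq _ pvH2_le array, pvDir_eq _ pvH2_ge array]
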